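-- pv_equiv track=rewrite | github.com/GundalaNikhil/DSA | dsa-problems/Greedy/solutions/python/GRD-013-auditorium-seat-refunds.py | highest_occupied_row
-- ===== SOURCE A (Python) =====
-- def highest_occupied_row(r: int, capacities: list, refunds: list) -> int:
--     total_capacity = sum(capacities)
--     total_people = total_capacity - len(refunds)
--
--     if total_people <= 0:
--         return 0
--
--     for i in range(r):
--         total_people -= capacities[i]
--         if total_people <= 0:
--             return i + 1
--
--     return r
-- ===== SOURCE B (Python) =====
-- def highest_occupied_row(r: int, capacities: list, refunds: list) -> int:
--     m = len(refunds)
--     if sum(capacities) <= m: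
--         return 0
--     k = max(min(r, len(capacities)), 0)
--     ans = r
--     t = sum(capacities[k:])  # people seated beyond row k
--     for i in reversed(range(k)):
--         if t <= m:
--             ans = i + 1
--         t += capacities[i]
--     return ans
-- ===== Notes on version B (the rewrite author's own statement) =====
-- stated objective: alternative
-- what changed: Instead of A's forward loop that subtracts capacities from a mutating remaining-people counter, B scans the rows BACKWARD maintaining a suffix sum of capacities and records the smallest row whose tail audience fits into the refund count (prefix_{i+1} >= people iff suffix_{i+1} <= len(refunds)).
import Mathlib
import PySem

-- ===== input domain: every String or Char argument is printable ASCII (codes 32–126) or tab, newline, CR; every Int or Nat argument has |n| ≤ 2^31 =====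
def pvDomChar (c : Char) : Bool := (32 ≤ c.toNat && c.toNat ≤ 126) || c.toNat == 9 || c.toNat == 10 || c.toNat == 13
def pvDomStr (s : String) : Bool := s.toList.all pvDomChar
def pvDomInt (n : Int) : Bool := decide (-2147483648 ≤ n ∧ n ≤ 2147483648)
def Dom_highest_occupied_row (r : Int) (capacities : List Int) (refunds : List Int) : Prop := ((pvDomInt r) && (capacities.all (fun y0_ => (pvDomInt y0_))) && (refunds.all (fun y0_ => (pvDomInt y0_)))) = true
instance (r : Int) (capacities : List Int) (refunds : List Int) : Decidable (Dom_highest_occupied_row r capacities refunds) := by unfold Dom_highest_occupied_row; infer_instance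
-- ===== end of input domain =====

-- B replaces A's forward subtract-from-remaining-people loop by a BACKWARD scan that
-- maintains a suffix sum of capacities and records the smallest row whose tail audience
-- fits in the refund count (objective: alternative decomposition, same linear cost).

-- ===== PORT A =====
-- the for-loop with early return: some v = 'return v' from inside the loop, none = loop exhausted
def pvLoopA (capacities : List Int) : List Int → Int → Option Int
  | [], _ => none
  | i :: rest, total_people =>
    match PySem.List.pyGet? capacities i with
    | none => some 0  -- Python IndexError; provably unreachable (crossing happens by the list's end since len(refunds) ≥ 0)
    | some c =>
      if total_people - c ≤ 0 then some (i + 1) else pvLoopA capacities rest (total_people - c)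

def highest_occupied_row (r : Int) (capacities : List Int) (refunds : List Int) : Int :=
  let total_capacity := capacities.sum
  let total_people := total_capacity - refunds.length
  if total_people ≤ 0 then 0
  else
    match pvLoopA capacities (PySem.List.pyRange 0 r 1) total_people with
    | some v => v
    | none => r

-- ===== PORT B =====
-- for i in reversed(range(k)): if t <= m: ans = i + 1; t += capacities[i]
def pvLoopB (capacities : List Int) (m : Int) : Nat → Int → Int → Int
  | 0, ans, _ => ans
  | j + 1, ans, t =>
    let ans' := if t ≤ m then ((j : Int) + 1) else ans
    let c := match PySem.List.pyGet? capacities ((j : Nat) : Int) with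
             | some c => c
             | none => 0  -- unreachable: j < k ≤ len(capacities)
    pvLoopB capacities m j ans' (t + c)

def highest_occupied_row_alt (r : Int) (capacities : List Int) (refunds : List Int) : Int :=
  let m : Int := refunds.length
  if capacities.sum ≤ m then 0
  else
    let k : Int := max (min r (capacities.length : Int)) 0
    let t0 := (PySem.List.slice capacities (some k) none).sum
    pvLoopB capacities m k.toNat r t0

-- ===== PRECONDITION & SPEC =====
def Spec_highest_occupied_row (r : Int) (capacities : List Int) (refunds : List Int) (out : Int) : Prop := out = highest_occupied_row_alt r capacities refunds
instance (r : Int) (capacities : List Int) (refunds : List Int) (out : Int) : Decidable (Spec_highest_occupied_row r capacities refunds out) := by unfold Spec_highest_occupied_row; infer_instance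

-- ===== CLAIM (what is proved, stated in full; the proofs are below) =====
def Claim_equal_highest_occupied_row : Prop := ∀ (r : Int) (capacities : List Int) (refunds : List Int), Dom_highest_occupied_row r capacities refunds → Spec_highest_occupied_row r capacities refunds (highest_occupied_row r capacities refunds)

-- ===== LEMMAS AND PROOFS =====

-- Proof-side bridge: a forward first-crossing search over running prefix sums.
-- Both ports are reduced to 'pvFind r total 0 (pvAccum (capacities.take …) 0)'.
def pvAccum : List Int → Int → List Int
  | [], _ => []
  | x :: rest, s => (s + x) :: pvAccum rest (s + x)

def pvFind (r total : Int) : Int → List Int → Int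
  | _, [] => r
  | i, s :: rest => if total ≤ s then i + 1 else pvFind r total (i + 1) rest

-- A's loop equals the forward search (invariant: carried count = total - prefix sum so far;
-- the IndexError branch is dead because total - s ≤ sum of the remaining capacities).
theorem pv_core (capacities : List Int) (r total : Int) :
    ∀ (xs : List Int) (k : Nat) (s : Int),
      capacities.drop k = xs →
      0 < total - s →
      total - s ≤ xs.sum →
      (match pvLoopA capacities (PySem.List.pyRange (k : Int) r 1) (total - s) with
        | some v => v
        | none => r)
        = pvFind r total (k : Int) (pvAccum (xs.take (r.toNat - k)) s) := by
  intro xs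
  induction xs with
  | nil =>
    intro k s _ hpos hle
    simp at hle
    omega
  | cons c rest ih =>
    intro k s hdrop hpos hle
    have hklen : k < capacities.length := by
      by_contra h
      have : capacities.drop k = [] := List.drop_eq_nil_of_le (by omega)
      rw [hdrop] at this
      exact List.cons_ne_nil _ _ this
    by_cases hkr : (k : Int) < r
    · rw [PySem.List.pyRange_one_cons hkr]
      have hget : PySem.List.pyGet? capacities (k : Int) = some c := by
        rw [PySem.List.pyGet?_natCast]
        rw [← List.head?_drop, hdrop]
        rfl
      have htake : (c :: rest).take (r.toNat - k) = c :: rest.take (r.toNat - (k + 1)) := by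
        have h1 : r.toNat - k = (r.toNat - (k + 1)) + 1 := by omega
        rw [h1, List.take_succ_cons]
      rw [htake]
      simp only [pvLoopA, pvAccum, pvFind, hget]
      by_cases hcross : total - s - c ≤ 0
      · have : total ≤ s + c := by omega
        simp [hcross, this]
      · have h2 : ¬ total ≤ s + c := by omega
        simp only [hcross, if_neg h2]
        have hdrop' : capacities.drop (k + 1) = rest := by
          have h := congrArg List.tail hdrop
          rwa [List.tail_drop] at h
        have := ih (k + 1) (s + c) hdrop' (by omega)
          (by simp at hle; omega)
        have harith : total - (s + c) = total - s - c := by ring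
        rw [harith] at this
        have hcast : ((k : Int) + 1) = ((k + 1 : Nat) : Int) := by push_cast; ring
        rw [hcast]
        exact this
    · rw [PySem.List.pyRange_one_eq_nil (by omega)]
      have : r.toNat - k = 0 := by omega
      rw [this]
      simp [pvLoopA, pvAccum, pvFind]

-- pvFind over a snoc: the last running sum is checked only if nothing before crossed.
theorem pvFind_snoc (total x : Int) :
    ∀ (ys : List Int) (r i : Int),
      pvFind r total i (ys ++ [x]) =
        pvFind (if total ≤ x then i + ys.length + 1 else r) total i ys := by
  intro ys
  induction ys with
  | nil => intro r i; simp [pvFind]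
  | cons s rest ih =>
    intro r i
    simp only [List.cons_append, pvFind]
    by_cases hs : total ≤ s
    · simp [hs]
    · simp only [if_neg hs, ih]
      congr 1
      by_cases hx : total ≤ x
      · rw [if_pos hx, if_pos hx]
        simp only [List.length_cons]
        push_cast
        omega
      · rw [if_neg hx, if_neg hx]

-- pvAccum over a snoc.
theorem pvAccum_snoc (x : Int) :
    ∀ (xs : List Int) (s : Int), pvAccum (xs ++ [x]) s = pvAccum xs s ++ [s + xs.sum + x] := by
  intro xs
  induction xs with
  | nil => intro s; simp [pvAccum]
  | cons y rest ih =>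
    intro s
    simp only [List.cons_append, pvAccum, ih, List.sum_cons]
    have h : s + y + rest.sum + x = s + (y + rest.sum) + x := by omega
    rw [h]

theorem pvAccum_length : ∀ (xs : List Int) (s : Int), (pvAccum xs s).length = xs.length := by
  intro xs
  induction xs with
  | nil => intro s; rfl
  | cons y rest ih => intro s; simp [pvAccum, ih]

-- B's backward loop equals the forward search over running prefix sums.
theorem pvLoopB_eq_find (capacities : List Int) (m r : Int) :
    ∀ (j : Nat), j ≤ capacities.length →
      pvLoopB capacities m j r ((capacities.drop j).sum) =
        pvFind r (capacities.sum - m) 0 (pvAccum (capacities.take j) 0) := by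
  intro j
  induction j generalizing r with
  | zero => intro _; simp [pvLoopB, pvAccum, pvFind]
  | succ j ih =>
    intro hj
    have hjlen : j < capacities.length := by omega
    have hget : PySem.List.pyGet? capacities ((j : Nat) : Int) = some capacities[j] := by
      rw [PySem.List.pyGet?_natCast]
      simp [List.getElem?_eq_getElem hjlen]
    have hdrop : capacities.drop j = capacities[j] :: capacities.drop (j + 1) := by
      rw [List.drop_eq_getElem_cons hjlen]
    have hsum : (capacities.drop j).sum = capacities[j] + (capacities.drop (j + 1)).sum := by
      rw [hdrop, List.sum_cons]
    have htake : capacities.take (j + 1) = capacities.take j ++ [capacities[j]] := by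
      rw [List.take_add_one, List.getElem?_eq_getElem hjlen]; rfl
    have hsplit : (capacities.take j).sum + (capacities.drop j).sum = capacities.sum := by
      rw [← List.sum_append, List.take_append_drop]
    simp only [pvLoopB, hget]
    rw [htake, pvAccum_snoc, pvFind_snoc]
    have hlen : (pvAccum (capacities.take j) 0).length = j := by
      rw [pvAccum_length, List.length_take_of_le (by omega)]
    rw [hlen]
    have hcond : (capacities.sum - m ≤ 0 + (capacities.take j).sum + capacities[j]) ↔
        ((capacities.drop (j + 1)).sum ≤ m) := by
      constructor <;> intro h <;> omega
    have hrec := ih (r := if (capacities.drop (j + 1)).sum ≤ m then ((j : Int) + 1) else r) (by omega)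
    have harg : (capacities.drop (j + 1)).sum + capacities[j] = (capacities.drop j).sum := by omega
    rw [harg, hrec]
    congr 1
    by_cases hc : (capacities.drop (j + 1)).sum ≤ m
    · rw [if_pos hc, if_pos (hcond.mpr hc)]
      omega
    · rw [if_neg hc, if_neg (fun h => hc (hcond.mp h))]

-- ===== VERDICT (by name: the statement is the Claim_ definition above) =====
theorem highest_occupied_row_spec : Claim_equal_highest_occupied_row := by
  intro r capacities refunds _
  unfold Spec_highest_occupied_row highest_occupied_row highest_occupied_row_alt
  simp only []
  by_cases h0 : capacities.sum - (refunds.length : Int) ≤ 0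
  · have h0' : capacities.sum ≤ (refunds.length : Int) := by omega
    simp [h0, h0']
  · have h0' : ¬ capacities.sum ≤ (refunds.length : Int) := by omega
    simp only [if_neg h0, if_neg h0']
    set n : Int := (capacities.length : Int) with hn
    set k : Int := max (min r n) 0 with hk
    have hk0 : 0 ≤ k := le_max_right _ _
    have hslice : PySem.List.slice capacities (some k) none = capacities.drop k.toNat :=
      PySem.List.slice_from capacities hk0
    have hA := pv_core capacities r (capacities.sum - (refunds.length : Int)) capacities 0 0
      (by simp) (by omega) (by omega)
    simp only [Nat.cast_zero, Nat.sub_zero, sub_zero] at hA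
    have hB := pvLoopB_eq_find capacities (refunds.length : Int) r k.toNat
      (by simp only [hk, hn]; omega)
    have htakeeq : capacities.take r.toNat = capacities.take k.toNat := by
      have hkval : k.toNat = min r.toNat capacities.length := by
        simp only [hk, hn]; omega
      rw [hkval, ← List.take_take, List.take_length]
    rw [hA, hslice, hB, htakeeq]
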